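-- pv_equiv track=rewrite | github.com/SujithChristopher/MoveVault | ui/subject_mapping_dialog.py | find_close_match
-- ===== SOURCE A (Python) =====
-- def find_close_match(subject, existing_subjects):
--     subject_lower = subject.lower()
--     for existing in existing_subjects:
--         if existing.lower() == subject_lower:
--             return existing
--     for existing in existing_subjects:
--         if subject_lower in existing.lower() or existing.lower() in subject_lower:
--             return existing
--     return None
-- ===== SOURCE B (Python) =====
-- def find_close_match(subject, existing_subjects):
--     subject_lower = subject.lower()
--     substring_candidate = None
--     for existing in existing_subjects:
--         existing_lower = existing.lower()
--         if existing_lower == subject_lower: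
--             return existing
--         if substring_candidate is None and (subject_lower in existing_lower or existing_lower in subject_lower):
--             substring_candidate = existing
--     return substring_candidate
-- ===== Notes on version B (the rewrite author's own statement) =====
-- stated objective: simpler
-- what changed: Fuses A's two sequential scans into one pass that returns immediately on an exact case-insensitive match while remembering the first substring match as a fallback, and lowercases each existing string once instead of up to three times.
import Mathlib
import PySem

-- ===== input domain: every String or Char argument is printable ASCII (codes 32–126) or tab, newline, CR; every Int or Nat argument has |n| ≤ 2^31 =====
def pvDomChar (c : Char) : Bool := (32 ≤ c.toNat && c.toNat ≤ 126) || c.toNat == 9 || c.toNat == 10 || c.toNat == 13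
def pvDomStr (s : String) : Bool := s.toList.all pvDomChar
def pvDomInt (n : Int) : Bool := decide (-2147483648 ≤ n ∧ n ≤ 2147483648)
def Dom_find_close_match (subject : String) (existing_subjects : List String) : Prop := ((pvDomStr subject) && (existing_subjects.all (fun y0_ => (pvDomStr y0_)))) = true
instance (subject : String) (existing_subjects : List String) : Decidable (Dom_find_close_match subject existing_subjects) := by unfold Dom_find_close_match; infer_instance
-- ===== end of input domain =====

-- B fuses A's two sequential scans into one pass (early return on exact match, first
-- substring match remembered as fallback); objective: simpler, same asymptotic cost.

-- ===== PORT A =====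
-- two sequential scans, exactly as A's two for-loops with early return
def find_close_match (subject : String) (existing_subjects : List String) : Option String :=
  let subject_lower := PySem.Str.lower subject
  match existing_subjects.find? (fun existing => PySem.Str.lower existing == subject_lower) with
  | some existing => some existing
  | none =>
      existing_subjects.find? (fun existing =>
        PySem.Str.isIn subject_lower (PySem.Str.lower existing) ||
        PySem.Str.isIn (PySem.Str.lower existing) subject_lower)

-- ===== PORT B =====
-- single pass with a remembered substring candidate (Source B's loop)
def fcmLoop (subject_lower : String) (cand : Option String) : List String → Option String
  | [] => cand
  | existing :: rest =>
      let existing_lower := PySem.Str.lower existing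
      if existing_lower == subject_lower then some existing
      else
        fcmLoop subject_lower
          (if cand.isNone &&
              (PySem.Str.isIn subject_lower existing_lower ||
               PySem.Str.isIn existing_lower subject_lower)
           then some existing else cand) rest

def find_close_match_alt (subject : String) (existing_subjects : List String) : Option String :=
  fcmLoop (PySem.Str.lower subject) none existing_subjects

-- ===== PRECONDITION & SPEC =====
def Spec_find_close_match (subject : String) (existing_subjects : List String) (out : Option String) : Prop := out = find_close_match_alt subject existing_subjects
instance (subject : String) (existing_subjects : List String) (out : Option String) : Decidable (Spec_find_close_match subject existing_subjects out) := by unfold Spec_find_close_match; infer_instance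

-- ===== CLAIM (what is proved, stated in full; the proofs are below) =====
def Claim_equal_find_close_match : Prop := ∀ (subject : String) (existing_subjects : List String), Dom_find_close_match subject existing_subjects → Spec_find_close_match subject existing_subjects (find_close_match subject existing_subjects)

-- ===== LEMMAS AND PROOFS =====

-- loop invariant: the fused loop equals "first exact match, else candidate, else first substring match"
theorem fcmLoop_eq (sl : String) (xs : List String) (cand : Option String) :
    fcmLoop sl cand xs =
      match xs.find? (fun e => PySem.Str.lower e == sl) with
      | some e => some e
      | none =>
          cand.orElse (fun _ =>
            xs.find? (fun e =>
              PySem.Str.isIn sl (PySem.Str.lower e) ||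
              PySem.Str.isIn (PySem.Str.lower e) sl)) := by
  induction xs generalizing cand with
  | nil => cases cand <;> simp [fcmLoop, Option.orElse]
  | cons e rest ih =>
      simp only [fcmLoop, List.find?_cons]
      by_cases hx : (PySem.Str.lower e == sl) = true
      · simp [hx]
      · simp only [hx, Bool.false_eq_true, if_false, ih]
        cases hfind : rest.find? (fun e => PySem.Str.lower e == sl) with
        | some e' => simp
        | none =>
            cases cand with
            | some c =>
                simp [Option.orElse]
            | none =>
                cases hs : (PySem.Str.isIn sl (PySem.Str.lower e) ||
                    PySem.Str.isIn (PySem.Str.lower e) sl) <;>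
                  simp_all [Option.orElse, PySem.Str.isIn]

-- ===== VERDICT (by name: the statement is the Claim_ definition above) =====
theorem find_close_match_spec : Claim_equal_find_close_match := by
  intro subject existing_subjects _
  unfold Spec_find_close_match find_close_match find_close_match_alt
  rw [fcmLoop_eq]
  cases hfind : existing_subjects.find? (fun e => PySem.Str.lower e == PySem.Str.lower subject) with
  | some e => simp only [hfind]
  | none => simp only [hfind, Option.orElse]
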